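-- pv_equiv track=rewrite | github.com/ElEscribanoSilente/Honeycomb-Optimized-Computing | benchmarks/workload_heavy.py | workload_hash_like
-- ===== SOURCE A (Python) =====
-- def workload_hash_like(
--     data_size: int = 64 * 1024,
--     rounds: int = 5000,
-- ) -> int:
--     """Iteraciones tipo hash sobre un buffer (solo CPU, sin NumPy pesado)."""
--     data = bytearray(b"x" * data_size)
--     h = 0x811C9DC5
--     for _ in range(rounds):
--         for i in range(0, len(data) - 4, 4):
--             w = (
--                 data[i]
--                 | (data[i + 1] << 8)
--                 | (data[i + 2] << 16)
--                 | (data[i + 3] << 24)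
--             )
--             h = ((h ^ w) * 0x01000193) & 0xFFFFFFFF
--         data[0] = (h & 0xFF)
--         data[1] = ((h >> 8) & 0xFF)
--     return h
-- ===== SOURCE B (Python) =====
-- def workload_hash_like(
--     data_size: int = 64 * 1024,
--     rounds: int = 5000,
-- ) -> int:
--     """Same hash, but without the bytearray: the buffer is all 0x78 except its
--     first two bytes, so each round is one word built from the two mutable low
--     bytes followed by count-1 constant-word steps."""
--     count = max(0, (data_size - 1) // 4)
--     h = 0x811C9DC5
--     b0 = b1 = 0x78
--     for _ in range(rounds):
--         if count > 0:
--             w0 = b0 | (b1 << 8) | (0x78 << 16) | (0x78 << 24)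
--             h = ((h ^ w0) * 0x01000193) & 0xFFFFFFFF
--             for _ in range(count - 1):
--                 h = ((h ^ 0x78787878) * 0x01000193) & 0xFFFFFFFF
--         b0 = h & 0xFF
--         b1 = (h >> 8) & 0xFF
--     return h
-- ===== Notes on version B (the rewrite author's own statement) =====
-- stated objective: simpler
-- what changed: B eliminates the data_size-byte bytearray entirely: since the buffer is all 0x78 except its two mutable low bytes, each round is one word built from the two kept bytes b0,b1 followed by count-1 iterations on the precomputed constant word 0x78787878, with count = max(0,(data_size-1)//4) computed once in closed form.
import Mathlib
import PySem

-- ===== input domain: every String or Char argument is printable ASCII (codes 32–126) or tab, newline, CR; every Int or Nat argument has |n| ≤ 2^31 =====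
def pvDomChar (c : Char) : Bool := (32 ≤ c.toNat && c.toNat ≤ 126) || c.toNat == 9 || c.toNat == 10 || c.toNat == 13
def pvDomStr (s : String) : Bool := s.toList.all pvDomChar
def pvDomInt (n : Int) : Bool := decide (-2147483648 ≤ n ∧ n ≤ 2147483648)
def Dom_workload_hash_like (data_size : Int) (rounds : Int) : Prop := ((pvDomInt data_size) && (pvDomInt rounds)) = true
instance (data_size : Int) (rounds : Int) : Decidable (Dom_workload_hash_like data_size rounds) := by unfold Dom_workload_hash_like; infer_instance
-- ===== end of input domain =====

-- B drops the bytearray and keeps only the two mutable low bytes plus a precomputed word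
-- count per round (objective: simpler state, measurably faster by a constant factor).

-- ===== PORT A =====
-- one inner-loop step: w = data[i] | data[i+1]<<8 | data[i+2]<<16 | data[i+3]<<24; h = ((h^w)*FNV)&mask
-- (indices are always in range when the loop body runs, so pyGetD with default 0 is exact there)
def pvAstep (data : List Int) (h : Int) (i : Int) : Int :=
  let w := PySem.Int.bor (PySem.Int.bor (PySem.Int.bor
             (PySem.List.pyGetD data i 0)
             ((PySem.List.pyGetD data (i+1) 0) <<< (8:Nat)))
             ((PySem.List.pyGetD data (i+2) 0) <<< (16:Nat)))
             ((PySem.List.pyGetD data (i+3) 0) <<< (24:Nat))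
  PySem.Int.band ((PySem.Int.bxor h w) * 16777619) 4294967295

-- one round: inner loop over range(0, len(data)-4, 4), then data[0], data[1] := low bytes of h
-- (data[0]=…/data[1]=… raise IndexError in Python when len(data) < 2; Pre_ excludes that, List.set no-ops)
def pvAround (st : List Int × Int) (_ : Int) : List Int × Int :=
  let h := (PySem.List.pyRange 0 ((st.1.length : Int) - 4) 4).foldl (pvAstep st.1) st.2
  ((st.1.set 0 (PySem.Int.band h 255)).set 1 (PySem.Int.band (h >>> (8:Nat)) 255), h)

def workload_hash_like (data_size : Int) (rounds : Int) : Int :=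
  ((PySem.List.pyRange 0 rounds 1).foldl pvAround
     (List.replicate data_size.toNat 120, 2166136261)).2

-- ===== PORT B =====
-- the constant-word step h = ((h ^ 0x78787878)*FNV)&mask
def pvBstep (h : Int) (_ : Int) : Int :=
  PySem.Int.band ((PySem.Int.bxor h 2021161080) * 16777619) 4294967295

-- one round of B: if count>0, one step on w0 built from b0,b1, then count-1 constant steps
def pvBround (count : Int) (st : Int × Int × Int) (_ : Int) : Int × Int × Int :=
  let h :=
    if 0 < count then
      let w0 := PySem.Int.bor (PySem.Int.bor (PySem.Int.bor
                  st.2.1 (st.2.2 <<< (8:Nat)))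
                  ((120:Int) <<< (16:Nat)))
                  ((120:Int) <<< (24:Nat))
      (PySem.List.pyRange 0 (count - 1) 1).foldl pvBstep
        (PySem.Int.band ((PySem.Int.bxor st.1 w0) * 16777619) 4294967295)
    else st.1
  (h, PySem.Int.band h 255, PySem.Int.band (h >>> (8:Nat)) 255)

def workload_hash_like_alt (data_size : Int) (rounds : Int) : Int :=
  ((PySem.List.pyRange 0 rounds 1).foldl
     (pvBround (max 0 (PySem.Int.floordiv (data_size - 1) 4)))
     (2166136261, 120, 120)).1

-- ===== PRECONDITION & SPEC =====
-- Pre_ excludes exactly the inputs where A raises IndexError: rounds ≥ 1 with a buffer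
-- of length < 2 (the writes data[0] = …, data[1] = … are out of range there).
def Pre_workload_hash_like (data_size : Int) (rounds : Int) : Prop :=
  rounds ≤ 0 ∨ 2 ≤ data_size
instance (data_size : Int) (rounds : Int) : Decidable (Pre_workload_hash_like data_size rounds) := by
  unfold Pre_workload_hash_like; infer_instance

def pvWitness_workload_hash_like : Int × Int := (10, 2)

def Spec_workload_hash_like (data_size : Int) (rounds : Int) (out : Int) : Prop :=
  out = workload_hash_like_alt data_size rounds
instance (data_size : Int) (rounds : Int) (out : Int) : Decidable (Spec_workload_hash_like data_size rounds out) := by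
  unfold Spec_workload_hash_like; infer_instance

-- ===== CLAIM (what is proved, stated in full; the proofs are below) =====
def Claim_equal_workload_hash_like : Prop := ∀ (data_size : Int) (rounds : Int), Dom_workload_hash_like data_size rounds → Pre_workload_hash_like data_size rounds → Spec_workload_hash_like data_size rounds (workload_hash_like data_size rounds)

-- ===== LEMMAS AND PROOFS =====

-- a fold of a body that ignores the list element is an iterate
lemma pv_foldl_const {α : Type} (g : Int → Int) (l : List α) (h : Int) :
    l.foldl (fun acc _ => g acc) h = g^[l.length] h := by
  induction l generalizing h with
  | nil => rfl
  | cons x t ih => simp [List.foldl_cons, ih, Function.iterate_succ_apply]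

-- the inner loop of A on a buffer b0 :: b1 :: 0x78* equals B's per-round hash update
lemma pv_inner_eq (N h b0 b1 : Int) (hN : 2 ≤ N) :
    (PySem.List.pyRange 0 (N - 4) 4).foldl
      (pvAstep (b0 :: b1 :: List.replicate (N.toNat - 2) 120)) h
    = (if 0 < max 0 (PySem.Int.floordiv (N - 1) 4) then
        (PySem.List.pyRange 0 (max 0 (PySem.Int.floordiv (N - 1) 4) - 1) 1).foldl pvBstep
          (PySem.Int.band ((PySem.Int.bxor h
            (PySem.Int.bor (PySem.Int.bor (PySem.Int.bor
              b0 (b1 <<< (8:Nat))) ((120:Int) <<< (16:Nat))) ((120:Int) <<< (24:Nat)))) * 16777619)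
            4294967295)
      else h) := by
  rw [PySem.List.pyRange_of_pos 0 (N - 4) (show (0:Int) < 4 by norm_num)]
  by_cases h5 : N ≤ 4
  · have h1 : ¬ ((0:Int) < N - 4) := by omega
    have hfd : PySem.Int.floordiv (N-1) 4 = 0 := by
      rw [PySem.Int.floordiv_eq_ediv_of_pos (by norm_num)]; omega
    rw [if_neg h1, hfd]
    simp
  · have hfd : PySem.Int.floordiv (N-1) 4 = (N-1)/4 := PySem.Int.floordiv_eq_ediv_of_pos (by norm_num)
    have hq1 : 1 ≤ (N-1)/4 := by omega
    have hmax : max 0 (PySem.Int.floordiv (N-1) 4) = (N-1)/4 := by rw [hfd]; omega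
    have h1 : ((0:Int) < N - 4) := by omega
    rw [if_pos h1]
    have hnum : (N - 4 - 0 + 4 - 1) = N - 1 := by ring
    rw [hnum, hmax, if_pos (show (0:Int) < (N-1)/4 from by omega)]
    set c' : Nat := ((N-1)/4).toNat - 1 with hc'
    have hc : ((N-1)/4).toNat = c' + 1 := by omega
    have hrep : List.replicate (N.toNat-2) (120:Int) = 120 :: 120 :: List.replicate (N.toNat-4) 120 := by
      have h4 : N.toNat - 2 = (N.toNat-4)+1+1 := by omega
      rw [h4]; simp [List.replicate_succ]
    rw [List.foldl_map, hc, List.range_succ_eq_map, List.foldl_cons, List.foldl_map]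
    -- head step
    have hhead : pvAstep (b0 :: b1 :: List.replicate (N.toNat - 2) 120) h (0 + 4 * ((0:Nat):Int))
        = PySem.Int.band ((PySem.Int.bxor h
            (PySem.Int.bor (PySem.Int.bor (PySem.Int.bor
              b0 (b1 <<< (8:Nat))) ((120:Int) <<< (16:Nat))) ((120:Int) <<< (24:Nat)))) * 16777619)
            4294967295 := by
      unfold pvAstep
      rw [hrep]
      norm_num [PySem.List.pyGetD_ofNat']
    rw [hhead]
    -- tail: every further word is the constant 0x78787878
    have hw : PySem.Int.bor (PySem.Int.bor (PySem.Int.bor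
        (120:Int) ((120:Int) <<< (8:Nat))) ((120:Int) <<< (16:Nat))) ((120:Int) <<< (24:Nat)) = 2021161080 := by decide
    have hcongr : ∀ (acc : Int), ∀ k ∈ List.range c',
        pvAstep (b0 :: b1 :: List.replicate (N.toNat - 2) 120) acc (0 + 4 * ((Nat.succ k : Nat) : Int))
        = (fun a => pvBstep a 0) acc := by
      intro acc k hk
      rw [List.mem_range] at hk
      have hb : 4 * ((c':Int) + 1) ≤ N - 1 := by
        omega
      unfold pvAstep pvBstep
      have hread : ∀ off : Nat, off ≤ 3 →
          PySem.List.pyGetD (b0 :: b1 :: List.replicate (N.toNat - 2) 120) (0 + 4 * ((Nat.succ k : Nat) : Int) + (off:Int)) 0 = 120 := by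
        intro off hoff
        have hnn : (0:Int) ≤ 0 + 4 * ((Nat.succ k : Nat) : Int) + (off:Int) := by positivity
        rw [PySem.List.pyGetD_of_nonneg _ _ hnn]
        have ht : (0 + 4 * ((Nat.succ k : Nat) : Int) + (off:Int)).toNat = 4*k+4+off - 2 + 1 + 1 := by omega
        rw [ht, List.getD_cons_succ, List.getD_cons_succ]
        exact List.getD_replicate _ (by omega)
      have r0 := hread 0 (by norm_num)
      have r1 := hread 1 (by norm_num)
      have r2 := hread 2 (by norm_num)
      have r3 := hread 3 (by norm_num)
      norm_num at r0 r1 r2 r3 ⊢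
      rw [r0, r1, r2, r3, hw]
    rw [PySem.List.foldl_congr_mem _ _ _ _ hcongr, pv_foldl_const]
    -- B side is the same iterate
    have hB : ∀ (X : Int) (l : List Int), l.foldl pvBstep X = (fun a => pvBstep a 0)^[l.length] X := by
      intro X l
      exact pv_foldl_const (fun a => pvBstep a 0) l X
    rw [hB, PySem.List.length_pyRange_one, List.length_range]
    congr 1
    omega


-- outer loop invariant: A's buffer is b0 :: b1 :: 0x78* with b0,b1 = B's two bytes
lemma pv_round_eq (N : Int) (hN : 2 ≤ N) (l : List Int) :
    ∀ (h b0 b1 : Int),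
      (l.foldl pvAround (b0 :: b1 :: List.replicate (N.toNat - 2) 120, h)).2
      = (l.foldl (pvBround (max 0 (PySem.Int.floordiv (N - 1) 4))) (h, b0, b1)).1 := by
  induction l with
  | nil => intro h b0 b1; rfl
  | cons x t ih =>
    intro h b0 b1
    have hlen : (((b0 :: b1 :: List.replicate (N.toNat - 2) 120).length : Int) - 4) = N - 4 := by
      simp [List.length_replicate]
      omega
    simp only [List.foldl_cons]
    have hA : pvAround (b0 :: b1 :: List.replicate (N.toNat - 2) 120, h) x
        = (let h' := (pvBround (max 0 (PySem.Int.floordiv (N - 1) 4)) (h, b0, b1) x).1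
           (PySem.Int.band h' 255 :: PySem.Int.band (h' >>> (8:Nat)) 255 :: List.replicate (N.toNat - 2) 120, h')) := by
      unfold pvAround pvBround
      simp only [hlen]
      rw [pv_inner_eq N h b0 b1 hN]
      simp [List.set]
    rw [hA]
    have hB : pvBround (max 0 (PySem.Int.floordiv (N - 1) 4)) (h, b0, b1) x
        = (let h' := (pvBround (max 0 (PySem.Int.floordiv (N - 1) 4)) (h, b0, b1) x).1
           (h', PySem.Int.band h' 255, PySem.Int.band (h' >>> (8:Nat)) 255)) := by
      unfold pvBround; rfl
    rw [hB]
    exact ih _ _ _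

-- ===== VERDICT (by name: the statement is the Claim_ definition above) =====
theorem workload_hash_like_spec : Claim_equal_workload_hash_like := by
  intro ds r _ hPre
  unfold Spec_workload_hash_like workload_hash_like workload_hash_like_alt
  by_cases hr : r ≤ 0
  · rw [PySem.List.pyRange_one_eq_nil hr]; rfl
  · have hds : 2 ≤ ds := by
      rcases hPre with h | h
      · omega
      · exact h
    have h2 : ds.toNat = (ds.toNat - 2) + 1 + 1 := by omega
    rw [h2, List.replicate_succ, List.replicate_succ]
    exact pv_round_eq ds hds _ 2166136261 120 120
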